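-- pv_equiv track=rewrite | github.com/MuhammadMehdiRaza/AI_Semester_Project | AI_Project/data/augmented/plagiarized_20.py | factorial_sum_v1
-- ===== SOURCE A (Python) =====
-- import math
--
-- def factorial_sum_v1(n):
--     sum_val = 0
--     for i in range(1, n + 1):
--         if i % 2 == 0:
--             sum_val += math.factorial(i)
--         else:
--             sum_val += i
--     return sum_val
-- ===== SOURCE B (Python) =====
-- def factorial_sum_v1(n):
--     # odd part in closed form: sum of first k odd numbers = k^2
--     k = max(0, (n + 1) // 2)
--     total = k * k
--     # even part with a running factorial (no per-element factorial recomputation)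
--     fact = 1
--     for i in range(2, n + 1, 2):
--         fact *= (i - 1) * i
--         total += fact
--     return total
-- ===== Notes on version B (the rewrite author's own statement) =====
-- stated objective: faster
-- what changed: B replaces the per-element parity branch by a closed form k^2 for the odd part (k = number of odds in 1..n) and loops only over the evens with a running factorial instead of recomputing math.factorial(i) for each even i.
import Mathlib
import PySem

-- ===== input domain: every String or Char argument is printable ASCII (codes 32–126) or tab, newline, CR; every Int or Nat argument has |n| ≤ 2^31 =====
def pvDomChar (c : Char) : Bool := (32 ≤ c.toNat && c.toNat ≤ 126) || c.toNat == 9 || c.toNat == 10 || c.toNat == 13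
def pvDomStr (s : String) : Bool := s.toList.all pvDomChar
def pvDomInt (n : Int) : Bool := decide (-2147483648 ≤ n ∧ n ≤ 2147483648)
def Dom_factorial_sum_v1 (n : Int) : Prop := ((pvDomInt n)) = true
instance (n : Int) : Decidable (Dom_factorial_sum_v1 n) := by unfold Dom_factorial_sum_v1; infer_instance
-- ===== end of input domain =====

-- B computes the odd part by the closed form k^2 and accumulates the even factorials with a
-- running product instead of recomputing math.factorial per even i (objective: faster).

-- ===== PORT A =====
-- math.factorial(i): i here is always ≥ 1 (it runs over range(1, n+1)), so `(Nat.factorial i.toNat : Int)` is exact.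
def factorial_sum_v1 (n : Int) : Int :=
  (PySem.List.pyRange 1 (n + 1) 1).foldl
    (fun sum_val i =>
      if PySem.Int.mod i 2 = 0 then sum_val + (Nat.factorial i.toNat : Int)
      else sum_val + i) 0

-- ===== PORT B =====
def factorial_sum_v1_alt (n : Int) : Int :=
  let k : Int := max 0 (PySem.Int.floordiv (n + 1) 2)
  let r : Int × Int :=
    (PySem.List.pyRange 2 (n + 1) 2).foldl
      (fun (p : Int × Int) i =>
        let fact := p.2 * ((i - 1) * i)
        (p.1 + fact, fact)) (k * k, 1)
  r.1

-- ===== PRECONDITION & SPEC =====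
def Spec_factorial_sum_v1 (n : Int) (out : Int) : Prop := out = factorial_sum_v1_alt n
instance (n : Int) (out : Int) : Decidable (Spec_factorial_sum_v1 n out) := by unfold Spec_factorial_sum_v1; infer_instance

-- ===== CLAIM (what is proved, stated in full; the proofs are below) =====
def Claim_equal_factorial_sum_v1 : Prop := ∀ (n : Int), Dom_factorial_sum_v1 n → Spec_factorial_sum_v1 n (factorial_sum_v1 n)

-- ===== LEMMAS AND PROOFS =====

-- reference value: sum over 1..m of (i! if i even else i)
def pvG : Nat → Int
  | 0 => 0
  | m + 1 => pvG m + (if (m + 1) % 2 = 0 then (Nat.factorial (m + 1) : Int) else ((m : Int) + 1))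

-- sum of the factorials of the first j even numbers
def pvT : Nat → Int
  | 0 => 0
  | j + 1 => pvT j + (Nat.factorial (2 * (j + 1)) : Int)

theorem pvG_succ (m : Nat) :
    pvG (m + 1) = pvG m + (if (m + 1) % 2 = 0 then (Nat.factorial (m + 1) : Int) else ((m : Int) + 1)) := rfl

theorem pvT_succ (j : Nat) : pvT (j + 1) = pvT j + (Nat.factorial (2 * (j + 1)) : Int) := rfl

-- A's fold over 1..m equals pvG m
theorem pvA_eq (m : Nat) : factorial_sum_v1 (m : Int) = pvG m := by
  unfold factorial_sum_v1
  induction m with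
  | zero =>
      rw [PySem.List.pyRange_one_eq_nil (by norm_num)]
      rfl
  | succ m ih =>
      have hsplit := PySem.List.pyRange_one_succ_right (a := 1) (b := (m : Int) + 1) (by omega)
      have hc : ((m + 1 : Nat) : Int) + 1 = ((m : Int) + 1) + 1 := by push_cast; ring
      rw [hc, hsplit, List.foldl_append, ih]
      simp only [List.foldl_cons, List.foldl_nil]
      rw [PySem.Int.mod_eq_emod_of_pos (by norm_num), pvG_succ]
      have hmod : ((m : Int) + 1) % 2 = (((m + 1) % 2 : Nat) : Int) := by push_cast; ring_nf
      have htn : ((m : Int) + 1).toNat = m + 1 := by omega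
      rcases Nat.even_or_odd (m + 1) with he | ho
      · have h2 : (m + 1) % 2 = 0 := Nat.even_iff.mp he
        have h2' : ((m : Int) + 1) % 2 = 0 := by rw [hmod, h2]; rfl
        rw [if_pos h2', if_pos h2, htn]
      · have h2 : (m + 1) % 2 = 1 := Nat.odd_iff.mp ho
        have h2' : ¬ ((m : Int) + 1) % 2 = 0 := by rw [hmod, h2]; norm_num
        rw [if_neg h2', if_neg (by omega)]

-- B's even-loop invariant: folding the first j even numbers from (c, 1) yields (c + pvT j, (2j)!)
theorem pvB_fold (j : Nat) (c : Int) :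
    ((List.range j).map (fun k : Nat => (2 : Int) + 2 * (k : Int))).foldl
      (fun (p : Int × Int) i =>
        let fact := p.2 * ((i - 1) * i)
        (p.1 + fact, fact)) (c, 1)
    = (c + pvT j, (Nat.factorial (2 * j) : Int)) := by
  induction j with
  | zero => simp [pvT, Nat.factorial]
  | succ j ih =>
      rw [List.range_succ, List.map_append, List.foldl_append, ih]
      simp only [List.map_cons, List.map_nil, List.foldl_cons, List.foldl_nil]
      have hf : (Nat.factorial (2 * j) : Int) * ((2 + 2 * (j : Int) - 1) * (2 + 2 * (j : Int)))
          = (Nat.factorial (2 * (j + 1)) : Int) := by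
        have h2 : 2 * (j + 1) = (2 * j + 1) + 1 := by ring
        rw [h2, Nat.factorial_succ, Nat.factorial_succ]
        push_cast
        ring
      refine Prod.ext ?_ hf
      show c + pvT j + _ = c + pvT (j + 1)
      rw [pvT_succ, ← hf]
      ring

-- the closed form agrees with the reference
theorem pvG_closed (m : Nat) :
    pvG m = (((m + 1) / 2 : Nat) : Int) * (((m + 1) / 2 : Nat) : Int) + pvT (m / 2) := by
  induction m with
  | zero => simp [pvG, pvT]
  | succ m ih =>
      rw [pvG_succ, ih]
      rcases Nat.even_or_odd (m + 1) with he | ho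
      · have h2 : (m + 1) % 2 = 0 := Nat.even_iff.mp he
        obtain ⟨r, hr⟩ : ∃ r, m = 2 * r + 1 := ⟨m / 2, by omega⟩
        subst hr
        rw [if_pos h2]
        rw [show (2 * r + 1 + 1) / 2 = r + 1 from by omega,
            show (2 * r + 1 + 1 + 1) / 2 = r + 1 from by omega,
            show (2 * r + 1) / 2 = r from by omega,
            show (2 * r + 1 + 1) = 2 * (r + 1) from by ring,
            pvT_succ]
        ring
      · have h2 : (m + 1) % 2 = 1 := Nat.odd_iff.mp ho
        obtain ⟨r, hr⟩ : ∃ r, m = 2 * r := ⟨m / 2, by omega⟩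
        subst hr
        rw [if_neg (by omega)]
        rw [show (2 * r + 1) / 2 = r from by omega,
            show (2 * r + 1 + 1) / 2 = r + 1 from by omega,
            show (2 * r) / 2 = r from by omega]
        push_cast
        ring

-- B on a nonnegative input, via pyRange_of_pos and the fold invariant
theorem pvB_eq (m : Nat) : factorial_sum_v1_alt (m : Int) = pvG m := by
  unfold factorial_sum_v1_alt
  have hk : max 0 (PySem.Int.floordiv ((m : Int) + 1) 2) = (((m + 1) / 2 : Nat) : Int) := by
    rw [PySem.Int.floordiv_eq_ediv_of_pos (by norm_num)]
    omega
  have hr : PySem.List.pyRange 2 ((m : Int) + 1) 2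
      = (List.range (m / 2)).map (fun k : Nat => (2 : Int) + 2 * (k : Int)) := by
    rw [PySem.List.pyRange_of_pos _ _ (by norm_num)]
    have hC : (if (2 : Int) < (m : Int) + 1 then (((m : Int) + 1 - 2 + 2 - 1) / 2).toNat else 0)
        = m / 2 := by
      split_ifs with h
      · omega
      · omega
    rw [hC]
  rw [hk, hr]
  simp only [pvB_fold]
  rw [pvG_closed]

-- negative inputs: both sides are 0
theorem pvA_neg (n : Int) (h : n < 0) : factorial_sum_v1 n = 0 := by
  unfold factorial_sum_v1
  rw [PySem.List.pyRange_one_eq_nil (by omega)]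
  rfl

theorem pvB_neg (n : Int) (h : n < 0) : factorial_sum_v1_alt n = 0 := by
  unfold factorial_sum_v1_alt
  have hk : max 0 (PySem.Int.floordiv (n + 1) 2) = 0 := by
    rw [PySem.Int.floordiv_eq_ediv_of_pos (by norm_num)]
    omega
  have hr : PySem.List.pyRange 2 (n + 1) 2 = [] := by
    rw [PySem.List.pyRange_of_pos _ _ (by norm_num), if_neg (by omega)]
    rfl
  rw [hk, hr]
  simp

-- ===== VERDICT (by name: the statement is the Claim_ definition above) =====
theorem factorial_sum_v1_spec : Claim_equal_factorial_sum_v1 := by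
  intro n _
  unfold Spec_factorial_sum_v1
  rcases le_or_gt 0 n with h | h
  · obtain ⟨m, rfl⟩ : ∃ m : Nat, n = (m : Int) := ⟨n.toNat, (Int.toNat_of_nonneg h).symm⟩
    rw [pvA_eq, pvB_eq]
  · rw [pvA_neg n (by omega), pvB_neg n (by omega)]
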